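-- pv_equiv track=rewrite | github.com/Zeph3r/pkgprobe | pkgprobe_trace/installer_executor.py | _merge_msi_args
-- ===== SOURCE A (Python) =====
-- from typing import List, Optional
--
-- def _merge_msi_args(args: List[str]) -> List[str]:
--     lower = {a.lower() for a in args}
--     out = list(args)
--     if "/norestart" not in lower and "-norestart" not in lower:
--         out.append("/norestart")
--     has_log = any(a.lower().startswith("/log") or a.lower().startswith("-log") for a in out)
--     if not has_log:
--         out.extend(["/log", r"C:\trace\logs\msi_install.log"])
--     return out
-- ===== SOURCE B (Python) =====
-- from typing import List
--
--
-- def _merge_msi_args(args: List[str]) -> List[str]: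
--     # Table of pending defaults (matcher, tokens); each arg filters out the
--     # rows it satisfies, and whatever rows survive are flattened and appended.
--     pending = [
--         (lambda al: al == "/norestart" or al == "-norestart", ["/norestart"]),
--         (lambda al: al.startswith("/log") or al.startswith("-log"),
--          ["/log", r"C:\trace\logs\msi_install.log"]),
--     ]
--     for a in args:
--         al = a.lower()
--         pending = [(m, toks) for (m, toks) in pending if not m(al)]
--     return args + [tok for _, toks in pending for tok in toks]
-- ===== Notes on version B (the rewrite author's own statement) =====
-- stated objective: alternative
-- what changed: Replaces the set-comprehension + any() flag checks with a table of pending defaults (matcher, tokens) that is recursively filtered down while walking the args; the surviving table rows are flattened and appended.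
import Mathlib
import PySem

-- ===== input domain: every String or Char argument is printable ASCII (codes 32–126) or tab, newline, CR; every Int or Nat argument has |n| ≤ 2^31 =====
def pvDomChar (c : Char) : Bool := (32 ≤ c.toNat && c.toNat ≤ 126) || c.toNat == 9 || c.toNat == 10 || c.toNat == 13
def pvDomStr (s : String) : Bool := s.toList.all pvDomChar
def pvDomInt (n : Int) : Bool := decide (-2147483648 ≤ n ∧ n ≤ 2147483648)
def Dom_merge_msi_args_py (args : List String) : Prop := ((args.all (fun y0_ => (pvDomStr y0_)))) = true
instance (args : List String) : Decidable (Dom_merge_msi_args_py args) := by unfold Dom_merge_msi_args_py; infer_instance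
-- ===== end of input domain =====

-- B replaces the set-comprehension + any() flag checks by a table of pending defaults
-- recursively filtered while walking args; objective: alternative.

-- ===== PORT A =====
def merge_msi_args_py (args : List String) : List String :=
  let lower : PySem.Set String := PySem.Set.ofList (args.map (fun a => PySem.Str.lower a))
  let out := args
  let out := if !(PySem.Set.contains lower "/norestart") && !(PySem.Set.contains lower "-norestart")
             then out ++ ["/norestart"] else out
  let has_log := out.any (fun a =>
      PySem.Str.startswith (PySem.Str.lower a) "/log" || PySem.Str.startswith (PySem.Str.lower a) "-log")
  if !has_log then out ++ ["/log", "C:\\trace\\logs\\msi_install.log"] else out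

-- ===== PORT B =====
def merge_msi_args_py_alt (args : List String) : List String :=
  let table : List ((String → Bool) × List String) :=
    [ (fun al => al == "/norestart" || al == "-norestart", ["/norestart"]),
      (fun al => PySem.Str.startswith al "/log" || PySem.Str.startswith al "-log",
       ["/log", "C:\\trace\\logs\\msi_install.log"]) ]
  let pending := args.foldl
    (fun pending a => pending.filter (fun p => !p.1 (PySem.Str.lower a))) table
  args ++ pending.flatMap (fun p => p.2)

-- ===== PRECONDITION & SPEC =====
def Spec_merge_msi_args_py (args : List String) (out : List String) : Prop := out = merge_msi_args_py_alt args
instance (args : List String) (out : List String) : Decidable (Spec_merge_msi_args_py args out) := by unfold Spec_merge_msi_args_py; infer_instance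

-- ===== CLAIM (what is proved, stated in full; the proofs are below) =====
def Claim_equal_merge_msi_args_py : Prop := ∀ (args : List String), Dom_merge_msi_args_py args → Spec_merge_msi_args_py args (merge_msi_args_py args)

-- ===== LEMMAS AND PROOFS =====

-- B's filtering fold keeps exactly the table rows whose matcher fires on no argument
theorem pvFold_filter_eq (rest : List String) (pending : List ((String → Bool) × List String)) :
    rest.foldl (fun pending a => pending.filter (fun p => !p.1 (PySem.Str.lower a))) pending
    = pending.filter (fun p => !rest.any (fun x => p.1 (PySem.Str.lower x))) := by
  induction rest generalizing pending with
  | nil => simp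
  | cons x xs ih =>
    rw [List.foldl_cons, ih, List.filter_filter]
    apply List.filter_congr
    intro p _
    simp only [List.any_cons, Bool.not_or]
    exact (Bool.and_comm _ _)

-- membership in set(map(lower, args)) is an any() over args
theorem pv_contains_ofList_map (args : List String) (x : String) :
    PySem.Set.contains (PySem.Set.ofList (args.map (fun a => PySem.Str.lower a))) x
    = args.any (fun a => PySem.Str.lower a == x) := by
  rw [Bool.eq_iff_iff, List.any_eq_true]
  simp only [PySem.Set.contains, List.contains_iff_mem, PySem.Set.mem_ofList, List.mem_map,
    beq_iff_eq]

-- an any() of a disjunction splits into two any()s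
theorem pv_any_split (l : List String) :
    (l.any fun a => PySem.Str.lower a == "/norestart" || PySem.Str.lower a == "-norestart")
    = ((l.any fun a => PySem.Str.lower a == "/norestart") ||
       (l.any fun a => PySem.Str.lower a == "-norestart")) := by
  induction l with
  | nil => rfl
  | cons x xs ih =>
    simp only [List.any_cons, ih]
    cases (PySem.Str.lower x == "/norestart") <;> cases (PySem.Str.lower x == "-norestart") <;> simp

theorem merge_msi_args_py_eq (args : List String) :
    merge_msi_args_py args = merge_msi_args_py_alt args := by
  unfold merge_msi_args_py merge_msi_args_py_alt
  dsimp only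
  rw [pvFold_filter_eq, pv_contains_ofList_map, pv_contains_ofList_map]
  have hno : (PySem.Str.startswith (PySem.Str.lower "/norestart") "/log" ||
              PySem.Str.startswith (PySem.Str.lower "/norestart") "-log") = false := by decide
  cases ha : (args.any fun a => PySem.Str.lower a == "/norestart") <;>
  cases hb : (args.any fun a => PySem.Str.lower a == "-norestart") <;>
  cases hc : (args.any fun a =>
      PySem.Str.startswith (PySem.Str.lower a) "/log" ||
      PySem.Str.startswith (PySem.Str.lower a) "-log") <;>
  simp only [List.filter, pv_any_split, ha, hb, hc, List.any_append, List.any_cons,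
    List.any_nil, hno, Bool.not_true, Bool.not_false, Bool.and_true, Bool.and_false,
    Bool.or_false, Bool.or_true, Bool.false_eq_true, if_true, if_false, List.flatMap_cons,
    List.flatMap_nil, List.append_nil, List.append_assoc] <;> rfl

-- ===== VERDICT (by name: the statement is the Claim_ definition above) =====
theorem merge_msi_args_py_spec : Claim_equal_merge_msi_args_py := by
  intro args _
  unfold Spec_merge_msi_args_py
  exact merge_msi_args_py_eq args
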